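-- pv_equiv track=rewrite | github.com/ArunabSingh/LeetcodeQAs | Easy/generateDocument.py | generateDocument
-- ===== SOURCE A (Python) =====
-- def generateDocument(characters, document):
--     # Write your code here.
--     chars = {}
--
--     for char in characters:
--         if char in chars:
--             chars[char] += 1
--         else:
--             chars[char] = 1
--
--     for char in document:
--         if char in chars:
--             if chars[char] == 1:
--                 chars.pop(char)
--             else:
--                 chars[char] -= 1
--         else:
--             return False
--     return True
-- ===== SOURCE B (Python) =====
-- def generateDocument(characters, document):
--     need = {}
--     for ch in document:
--         need[ch] = need.get(ch, 0) + 1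
--     avail = {}
--     for ch in characters:
--         avail[ch] = avail.get(ch, 0) + 1
--     return all(avail.get(ch, 0) >= cnt for ch, cnt in need.items())
-- ===== Notes on version B (the rewrite author's own statement) =====
-- stated objective: simpler
-- what changed: Two independent frequency tables (document needs vs available characters) compared at the end, instead of A's interleaved scan of the document that decrements/pops a mutable counter with an early return.
import Mathlib
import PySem

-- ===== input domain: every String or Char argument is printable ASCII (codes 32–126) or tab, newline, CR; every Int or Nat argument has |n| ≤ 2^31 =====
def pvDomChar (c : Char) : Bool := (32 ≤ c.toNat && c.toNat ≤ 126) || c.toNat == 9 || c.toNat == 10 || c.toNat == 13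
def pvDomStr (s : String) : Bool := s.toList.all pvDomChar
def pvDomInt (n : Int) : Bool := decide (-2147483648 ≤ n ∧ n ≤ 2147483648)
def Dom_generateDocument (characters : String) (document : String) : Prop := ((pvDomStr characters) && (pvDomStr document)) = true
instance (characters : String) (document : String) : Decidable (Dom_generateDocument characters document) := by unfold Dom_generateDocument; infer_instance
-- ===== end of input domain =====

-- B replaces A's interleaved decrement-and-early-return scan of the document by two
-- independent frequency tables compared at the end (objective: simpler decomposition).

-- ===== PORT A =====
-- A's document loop: decrement/pop the mutable counter, early return False on a missing char
def gdLoopA (chars : PySem.Dict Char Int) : List Char → Bool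
  | [] => true
  | c :: rest =>
    if chars.contains c then
      if chars.getD c 0 == 1 then gdLoopA (chars.erase c) rest
      else gdLoopA (chars.insert c (chars.getD c 0 - 1)) rest
    else false

def generateDocument (characters : String) (document : String) : Bool :=
  let chars := characters.toList.foldl
    (fun d ch => if d.contains ch then d.insert ch (d.getD ch 0 + 1) else d.insert ch 1)
    (PySem.Dict.empty : PySem.Dict Char Int)
  gdLoopA chars document.toList

-- ===== PORT B =====
def generateDocument_alt (characters : String) (document : String) : Bool :=
  let need := document.toList.foldl
    (fun d ch => d.insert ch (d.getD ch 0 + 1)) (PySem.Dict.empty : PySem.Dict Char Int)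
  let avail := characters.toList.foldl
    (fun d ch => d.insert ch (d.getD ch 0 + 1)) (PySem.Dict.empty : PySem.Dict Char Int)
  need.items.all (fun p => decide (p.2 ≤ avail.getD p.1 0))

-- ===== PRECONDITION & SPEC =====
def Spec_generateDocument (characters : String) (document : String) (out : Bool) : Prop := out = generateDocument_alt characters document
instance (characters : String) (document : String) (out : Bool) : Decidable (Spec_generateDocument characters document out) := by unfold Spec_generateDocument; infer_instance

-- ===== CLAIM (what is proved, stated in full; the proofs are below) =====
def Claim_equal_generateDocument : Prop := ∀ (characters : String) (document : String), Dom_generateDocument characters document → Spec_generateDocument characters document (generateDocument characters document)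

-- ===== LEMMAS AND PROOFS =====

-- Dict.erase carries no lookup lemmas in the prelude: characterise it here.
theorem dict_get?_erase {κ ν : Type} [BEq κ] [LawfulBEq κ] [DecidableEq κ]
    (d : PySem.Dict κ ν) (k x : κ) :
    (d.erase k).get? x = if x = k then none else d.get? x := by
  have key : ∀ (l : List (κ × ν)),
      List.find? (fun p => p.1 == x) (l.filter (fun p => !(p.1 == k))) =
        if x = k then none else List.find? (fun p => p.1 == x) l := by
    intro l
    induction l with
    | nil => simp
    | cons p rest ih =>
      by_cases hpk : (p.1 == k) = true
      · rw [List.filter_cons_of_neg (by simp [hpk]), ih]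
        by_cases hxk : x = k
        · rw [if_pos hxk, if_pos hxk]
        · have hpk' : p.1 = k := by simpa using hpk
          have hpx : (p.1 == x) = false := by
            simp only [hpk', beq_eq_false_iff_ne]
            exact fun hh => hxk hh.symm
          rw [if_neg hxk, if_neg hxk]
          simp [hpx]
      · rw [List.filter_cons_of_pos (by simp [hpk])]
        by_cases hpx : (p.1 == x) = true
        · have hxk : ¬ x = k := by
            have h1 : p.1 = x := by simpa using hpx
            have h2 : ¬ p.1 = k := by simpa using hpk
            rw [← h1]; exact h2
          rw [if_neg hxk]
          simp [hpx]
        · have hpx' : (p.1 == x) = false := by simpa using hpx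
          simp only [List.find?_cons, hpx']
          exact ih
  obtain ⟨items⟩ := d
  simp only [PySem.Dict.erase, PySem.Dict.get?, key]
  split <;> simp

theorem dict_getD_erase {κ ν : Type} [BEq κ] [LawfulBEq κ] [DecidableEq κ]
    (d : PySem.Dict κ ν) (k x : κ) (dflt : ν) :
    (d.erase k).getD x dflt = if x = k then dflt else d.getD x dflt := by
  simp only [PySem.Dict.getD, dict_get?_erase]
  split <;> rfl

theorem dict_contains_erase {κ ν : Type} [BEq κ] [LawfulBEq κ] [DecidableEq κ]
    (d : PySem.Dict κ ν) (k x : κ) :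
    (d.erase k).contains x = if x = k then false else d.contains x := by
  rw [PySem.Dict.contains_eq_isSome_get?, PySem.Dict.contains_eq_isSome_get?, dict_get?_erase]
  split <;> simp

-- A's document loop succeeds iff each character's count in the remaining document
-- fits into the availability function g that the dict d realises.
theorem gdLoopA_eq_true_iff (l : List Char) : ∀ (d : PySem.Dict Char Int) (g : Char → Int),
    (∀ c, d.getD c 0 = g c) → (∀ c, 0 ≤ g c) → (∀ c, d.contains c = true ↔ 0 < g c) →
    (gdLoopA d l = true ↔ ∀ c, (l.count c : Int) ≤ g c) := by
  induction l with
  | nil =>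
    intro d g _ hnn _
    simp only [gdLoopA, List.count_nil]
    constructor
    · intro _ c
      simpa using hnn c
    · intro _
      trivial
  | cons c rest ih =>
    intro d g hg hnn hct
    by_cases hc : d.contains c = true
    · have hpos : 0 < g c := (hct c).mp hc
      have hgc : d.getD c 0 = g c := hg c
      simp only [gdLoopA]
      rw [if_pos hc]
      by_cases h1 : d.getD c 0 = 1
      · have hg1 : g c = 1 := by rw [← hgc]; exact h1
        rw [if_pos (show (d.getD c 0 == 1) = true by rw [h1]; rfl)]
        rw [ih (d.erase c) (fun x => if x = c then 0 else g x)
            (fun x => by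
              rw [dict_getD_erase]
              by_cases hx : x = c <;> simp [hx, hg x])
            (fun x => by by_cases hx : x = c <;> simp [hx, hnn x])
            (fun x => by
              rw [dict_contains_erase]
              by_cases hx : x = c
              · simp [hx]
              · simp only [if_neg hx]
                exact hct x)]
        constructor
        · intro h x
          by_cases hx : x = c
          · subst hx
            have := h x
            rw [if_pos rfl] at this
            rw [List.count_cons_self, hg1]
            push_cast
            omega
          · have hcx : (c == x) = false := by
              simp only [beq_eq_false_iff_ne]
              exact fun hh => hx hh.symm
            have := h x
            rw [if_neg hx] at this
            simpa [List.count_cons, hcx] using this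
        · intro h x
          by_cases hx : x = c
          · subst hx
            have := h x
            rw [List.count_cons_self, hg1] at this
            rw [if_pos rfl]
            push_cast at this
            omega
          · have hcx : (c == x) = false := by
              simp only [beq_eq_false_iff_ne]
              exact fun hh => hx hh.symm
            have := h x
            rw [if_neg hx]
            simpa [List.count_cons, hcx] using this
      · have hne1 : g c ≠ 1 := by rw [← hgc]; exact h1
        rw [if_neg (show ¬ (d.getD c 0 == 1) = true by simp [h1])]
        rw [ih (d.insert c (d.getD c 0 - 1)) (fun x => if x = c then g c - 1 else g x)
            (fun x => by
              rw [PySem.Dict.getD_insert]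
              by_cases hx : x = c <;> simp [hx, hgc, hg x])
            (fun x => by by_cases hx : x = c <;> simp [hx, hnn x]; omega)
            (fun x => by
              show (d.insert c (d.getD c 0 - 1)).contains x = true ↔
                0 < (if x = c then g c - 1 else g x)
              rw [PySem.Dict.contains_insert]
              by_cases hx : x = c
              · subst hx
                rw [if_pos rfl]
                simp only [BEq.rfl, Bool.true_or]
                constructor
                · intro _
                  omega
                · intro _
                  trivial
              · rw [if_neg hx]
                simp only [show (x == c) = false by simp [hx], Bool.false_or]
                exact hct x)]
        constructor
        · intro h x
          by_cases hx : x = c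
          · subst hx
            have := h x
            rw [if_pos rfl] at this
            rw [List.count_cons_self]
            push_cast
            omega
          · have hcx : (c == x) = false := by
              simp only [beq_eq_false_iff_ne]
              exact fun hh => hx hh.symm
            have := h x
            rw [if_neg hx] at this
            simpa [List.count_cons, hcx] using this
        · intro h x
          by_cases hx : x = c
          · subst hx
            have := h x
            rw [List.count_cons_self] at this
            rw [if_pos rfl]
            push_cast at this
            omega
          · have hcx : (c == x) = false := by
              simp only [beq_eq_false_iff_ne]
              exact fun hh => hx hh.symm
            have := h x
            rw [if_neg hx]
            simpa [List.count_cons, hcx] using this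
    · have hng : ¬ 0 < g c := fun h => hc ((hct c).mpr h)
      simp only [gdLoopA]
      rw [if_neg hc]
      simp only [Bool.false_eq_true, false_iff]
      intro h
      have := h c
      rw [List.count_cons_self] at this
      push_cast at this
      omega

-- A's build loop is the standard counter: on an absent key getD gives 0, so both branches insert getD+1.
theorem buildA_eq_counter (cs : List Char) :
    cs.foldl (fun d ch => if d.contains ch then d.insert ch (d.getD ch 0 + 1) else d.insert ch 1)
      (PySem.Dict.empty : PySem.Dict Char Int) = PySem.Dict.counter cs := by
  rw [← PySem.Dict.foldl_insert_getD_add_one_eq_counter]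
  congr 1
  funext d ch
  by_cases h : d.contains ch = true
  · rw [if_pos h]
  · rw [if_neg h, PySem.Dict.getD_of_not_contains d 0 (by simpa using h), zero_add]

-- B's final pass is exactly the pointwise count comparison.
theorem altB_eq_true_iff (characters document : String) :
    generateDocument_alt characters document = true ↔
      ∀ c, (document.toList.count c : Int) ≤ (characters.toList.count c : Int) := by
  unfold generateDocument_alt
  dsimp only
  rw [PySem.Dict.foldl_insert_getD_add_one_eq_counter,
      PySem.Dict.foldl_insert_getD_add_one_eq_counter]
  rw [List.all_eq_true]
  constructor
  · intro h c
    by_cases hc : c ∈ document.toList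
    · have hm : (c, (document.toList.count c : Int)) ∈ (PySem.Dict.counter document.toList).items := by
        rw [PySem.Dict.items_counter]
        exact List.mem_map.mpr ⟨c, (PySem.Set.mem_ofList _ _).mpr hc, rfl⟩
      have := h _ hm
      simpa [PySem.Dict.getD_counter] using this
    · rw [List.count_eq_zero.mpr hc]
      simp
  · intro h p hp
    rw [PySem.Dict.items_counter] at hp
    obtain ⟨k, _, rfl⟩ := List.mem_map.mp hp
    simpa [PySem.Dict.getD_counter] using h k

-- ===== VERDICT (by name: the statement is the Claim_ definition above) =====
theorem generateDocument_spec : Claim_equal_generateDocument := by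
  intro characters document _
  unfold Spec_generateDocument
  rw [Bool.eq_iff_iff]
  unfold generateDocument
  dsimp only
  rw [buildA_eq_counter]
  rw [gdLoopA_eq_true_iff document.toList (PySem.Dict.counter characters.toList)
        (fun c => (characters.toList.count c : Int))
        (fun c => PySem.Dict.getD_counter characters.toList c)
        (fun c => Int.natCast_nonneg _)
        (fun c => by
          rw [PySem.Dict.contains_counter]
          constructor
          · intro h
            have hmem : c ∈ characters.toList := by simpa using h
            show (0 : Int) < (characters.toList.count c : Int)
            exact_mod_cast List.count_pos_iff.mpr hmem
          · intro h
            have h' : (0 : Int) < (characters.toList.count c : Int) := h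
            have : 0 < characters.toList.count c := by exact_mod_cast h'
            simpa using List.count_pos_iff.mp this)]
  exact (altB_eq_true_iff characters document).symm
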